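-- pv_equiv track=rewrite | github.com/dima137/GU_git | lib/multi_fgl_utils.py | is_in_tree
-- ===== SOURCE A (Python) =====
-- def max_node_length(tree):
--     nmax = 0
--     for node in tree:
--         nmax = max(nmax, len(node))
--     return nmax
--
-- def is_in_tree(node, tree=None):
--     if tree is None:
--         return True
--     nmax = max_node_length(tree)
--     nnode = len(node)
--     if nnode > nmax:
--         return False
--     elif nnode == nmax:
--         return node in tree
--     else:
--         for nd in tree:
--             if node == nd[:nnode]:
--                 return True
--     return False
-- ===== SOURCE B (Python) =====
-- def is_in_tree(node, tree=None):
--     if tree is None: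
--         return True
--     return any(node == nd[:len(node)] for nd in tree)
-- ===== Notes on version B (the rewrite author's own statement) =====
-- stated objective: simpler
-- what changed: Drops the max_node_length precomputation pass and the three-way length branch; one uniform single-pass prefix scan (any(node == nd[:len(node)])) replaces them.
import Mathlib
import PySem

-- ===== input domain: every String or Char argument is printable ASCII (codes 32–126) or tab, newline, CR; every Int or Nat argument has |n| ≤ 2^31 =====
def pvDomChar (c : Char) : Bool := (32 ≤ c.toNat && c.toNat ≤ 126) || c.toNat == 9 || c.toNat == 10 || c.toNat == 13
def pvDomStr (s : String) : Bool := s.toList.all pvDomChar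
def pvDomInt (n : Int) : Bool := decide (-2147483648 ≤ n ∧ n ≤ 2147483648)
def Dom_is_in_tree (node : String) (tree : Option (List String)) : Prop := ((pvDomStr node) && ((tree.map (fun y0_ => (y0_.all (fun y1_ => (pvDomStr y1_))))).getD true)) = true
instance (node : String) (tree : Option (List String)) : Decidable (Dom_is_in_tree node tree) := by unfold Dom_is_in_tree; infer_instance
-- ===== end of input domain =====

-- B drops A's max_node_length pass and three-way length branch for one uniform
-- single-pass prefix scan (simpler; same asymptotic cost).

-- ===== PORT A =====
def max_node_length (tree : List String) : Int :=
  tree.foldl (fun nmax nd => max nmax (PySem.Str.len nd)) 0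

def is_in_tree_loop (node : String) (nnode : Int) : List String → Bool
  | [] => false
  | nd :: rest =>
      if node = PySem.Str.slice nd none (some nnode) then true
      else is_in_tree_loop node nnode rest

def is_in_tree (node : String) (tree : Option (List String)) : Bool :=
  match tree with
  | none => true
  | some t =>
      let nmax := max_node_length t
      let nnode := PySem.Str.len node
      if nnode > nmax then false
      else if nnode = nmax then decide (node ∈ t)
      else is_in_tree_loop node nnode t

-- ===== PORT B =====
def is_in_tree_alt (node : String) (tree : Option (List String)) : Bool :=
  match tree with
  | none => true
  | some t => t.any (fun nd => decide (node = PySem.Str.slice nd none (some (PySem.Str.len node))))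

-- ===== PRECONDITION & SPEC =====
def Spec_is_in_tree (node : String) (tree : Option (List String)) (out : Bool) : Prop := out = is_in_tree_alt node tree
instance (node : String) (tree : Option (List String)) (out : Bool) : Decidable (Spec_is_in_tree node tree out) := by unfold Spec_is_in_tree; infer_instance

-- ===== CLAIM (what is proved, stated in full; the proofs are below) =====
def Claim_equal_is_in_tree : Prop := ∀ (node : String) (tree : Option (List String)), Dom_is_in_tree node tree → Spec_is_in_tree node tree (is_in_tree node tree)

-- ===== LEMMAS AND PROOFS =====

-- the (possibly clamped) prefix test, read on character lists
lemma pv_prefix_iff (node nd : String) :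
    (node = PySem.Str.slice nd none (some (PySem.Str.len node))) ↔
      node.toList = nd.toList.take node.toList.length := by
  rw [← String.toList_inj, PySem.Str.toList_slice, PySem.Chars.slice_eq_listSlice,
    PySem.Str.len_eq, PySem.List.slice_to_natCast]

lemma pv_foldl_max_ge_init (t : List String) (a : Int) :
    a ≤ t.foldl (fun m nd => max m (PySem.Str.len nd)) a := by
  induction t generalizing a with
  | nil => simp
  | cons hd tl ih => exact le_trans (le_max_left _ _) (ih _)

lemma pv_foldl_max_ge_mem (t : List String) (a : Int) (nd : String) (h : nd ∈ t) :
    PySem.Str.len nd ≤ t.foldl (fun m nd => max m (PySem.Str.len nd)) a := by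
  induction t generalizing a with
  | nil => cases h
  | cons hd tl ih =>
    rcases List.mem_cons.mp h with rfl | h'
    · exact le_trans (le_max_right _ _) (pv_foldl_max_ge_init _ _)
    · exact ih _ h'

lemma pv_loop_eq_any (node : String) (nnode : Int) (t : List String) :
    is_in_tree_loop node nnode t
      = t.any (fun nd => decide (node = PySem.Str.slice nd none (some nnode))) := by
  induction t with
  | nil => rfl
  | cons hd tl ih =>
    simp only [is_in_tree_loop, List.any_cons]
    split_ifs with h <;> simp [h, ih]

-- ===== VERDICT (by name: the statement is the Claim_ definition above) =====
theorem is_in_tree_spec : Claim_equal_is_in_tree := by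
  intro node tree _
  unfold Spec_is_in_tree
  cases tree with
  | none => rfl
  | some t =>
    simp only [is_in_tree, is_in_tree_alt]
    split_ifs with h1 h2
    · -- len(node) > nmax: no element can match the prefix test
      symm
      rw [List.any_eq_false]
      intro nd hnd
      simp only [decide_eq_true_eq, pv_prefix_iff]
      intro hpre
      have hle := pv_foldl_max_ge_mem t 0 nd hnd
      rw [PySem.Str.len_eq] at hle
      rw [PySem.Str.len_eq] at h1
      unfold max_node_length at h1
      have hc := congrArg List.length hpre
      rw [List.length_take] at hc
      omega
    · -- len(node) = nmax: membership coincides with the prefix scan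
      rw [Bool.eq_iff_iff]
      simp only [decide_eq_true_eq, List.any_eq_true, pv_prefix_iff]
      constructor
      · intro hmem
        exact ⟨node, hmem, by simp⟩
      · rintro ⟨nd, hnd, hpre⟩
        have hle := pv_foldl_max_ge_mem t 0 nd hnd
        rw [PySem.Str.len_eq] at hle
        rw [PySem.Str.len_eq] at h2
        unfold max_node_length at h2
        have hndle : nd.toList.length ≤ node.toList.length := by omega
        have htake : nd.toList.take node.toList.length = nd.toList :=
          List.take_of_length_le hndle
        rw [htake] at hpre
        exact (String.toList_inj.mp hpre) ▸ hnd
    · -- len(node) < nmax: A's loop is exactly B's scan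
      exact pv_loop_eq_any node (PySem.Str.len node) t
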